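-- pv_equiv track=rewrite | github.com/JPLMLIA/OWLS-Autonomy | src/gsw/HELM_FAME/util.py | count_motility
-- ===== SOURCE A (Python) =====
-- def count_motility(track_points_list):
--     """
--     Give a count of motility for each frame
--
--     :param track_points_list: the list to iterate over to find motility
--     :return: the count of motile and non motile from trackpoints list
--     """
--     _motile = 0
--     _non_motile = 0
--     for trackPoint in track_points_list:
--         if trackPoint["mobility"] is None:
--             _non_motile += 1
--         else:
--             if trackPoint["mobility"].lower() == "motile":
--                 _motile += 1
--             else:
--                 _non_motile += 1
--
--     return [_motile, _non_motile]
-- ===== SOURCE B (Python) =====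
-- def count_motility(track_points_list):
--     """
--     Give a count of motility for each frame.
--
--     Divide-and-conquer decomposition: split the point list at the midpoint,
--     count each half recursively (recursion depth O(log n)), and merge the
--     (motile, non_motile) pairs by component-wise addition.  Correct because
--     per-point counts are additive over concatenation.
--     """
--     pts = list(track_points_list)
--
--     def go(lo, hi):
--         n = hi - lo
--         if n == 0:
--             return (0, 0)
--         if n == 1:
--             mob = pts[lo]["mobility"]
--             if mob is not None and mob.lower() == "motile":
--                 return (1, 0)
--             return (0, 1)
--         mid = lo + n // 2
--         m1, nm1 = go(lo, mid)
--         m2, nm2 = go(mid, hi)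
--         return (m1 + m2, nm1 + nm2)
--
--     m, nm = go(0, len(pts))
--     return [m, nm]
-- ===== Notes on version B (the rewrite author's own statement) =====
-- stated objective: alternative
-- what changed: B replaces A's single linear pass with two branch-updated counters by a divide-and-conquer count: split the list at the midpoint, recursively count (motile, non_motile) pairs for each half, and merge them by component-wise addition; correctness rests on additivity of per-point counts over concatenation.
import Mathlib
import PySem

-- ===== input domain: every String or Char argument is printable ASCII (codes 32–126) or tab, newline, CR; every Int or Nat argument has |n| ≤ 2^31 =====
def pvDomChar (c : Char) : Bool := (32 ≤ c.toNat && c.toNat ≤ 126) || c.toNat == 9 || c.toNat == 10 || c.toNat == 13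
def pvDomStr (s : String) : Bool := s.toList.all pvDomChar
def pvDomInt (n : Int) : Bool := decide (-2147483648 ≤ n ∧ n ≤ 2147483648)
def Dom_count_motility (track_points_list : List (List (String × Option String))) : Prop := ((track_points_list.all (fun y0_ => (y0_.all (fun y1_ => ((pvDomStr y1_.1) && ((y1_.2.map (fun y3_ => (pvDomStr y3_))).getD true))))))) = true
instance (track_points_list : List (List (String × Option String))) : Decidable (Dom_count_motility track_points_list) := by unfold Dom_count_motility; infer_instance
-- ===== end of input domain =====

-- B counts via divide-and-conquer (split at midpoint, merge pairs by addition) instead of A's single linear pass (objective: alternative).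


-- ===== PORT A =====
-- dict lookup tp["mobility"]: first matching key (association list); none = KeyError (excluded by Pre_)
def mobLookup (tp : List (String × Option String)) : Option (Option String) :=
  (tp.find? (fun kv => kv.1 == "mobility")).map (·.2)

-- A's loop: two counters, branch per point.  The KeyError case (mobLookup = none) is
-- excluded by Pre_; the port leaves both counters unchanged there.
def countA : List (List (String × Option String)) → Int → Int → List Int
  | [], m, nm => [m, nm]
  | tp :: rest, m, nm =>
    match mobLookup tp with
    | none => countA rest m nm
    | some none => countA rest m (nm + 1)
    | some (some s) =>
      if PySem.Str.lower s == "motile" then countA rest (m + 1) nm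
      else countA rest m (nm + 1)

def count_motility (track_points_list : List (List (String × Option String))) : List Int :=
  countA track_points_list 0 0

-- ===== PORT B =====
-- B's base case for one point (pts[lo]); the KeyError case (mobLookup = none) is excluded by Pre_.
def ptB (tp : List (String × Option String)) : Int × Int :=
  match mobLookup tp with
  | some (some s) => if PySem.Str.lower s == "motile" then (1, 0) else (0, 1)
  | _ => (0, 1)

-- B's go(lo, hi) on the sublist pts[lo:hi]: split at the midpoint (n // 2 elements in the
-- left half, exactly Python's mid = lo + n // 2), recurse on both halves, add the pairs.
def goB : List (List (String × Option String)) → Int × Int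
  | [] => (0, 0)
  | [tp] => ptB tp
  | a :: b :: t =>
    let l := a :: b :: t
    let mid := l.length / 2
    let p := goB (l.take mid)
    let q := goB (l.drop mid)
    (p.1 + q.1, p.2 + q.2)
termination_by l => l.length
decreasing_by
  · simp [List.length_take]; omega
  · simp [List.length_drop]; omega

def count_motility_alt (track_points_list : List (List (String × Option String))) : List Int :=
  let p := goB track_points_list
  [p.1, p.2]

-- ===== PRECONDITION & SPEC =====
-- Pre_ excludes exactly the inputs where tp["mobility"] raises KeyError (a point with no "mobility" key).
def Pre_count_motility (track_points_list : List (List (String × Option String))) : Prop :=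
  ∀ tp ∈ track_points_list, (mobLookup tp).isSome = true
instance (track_points_list : List (List (String × Option String))) : Decidable (Pre_count_motility track_points_list) := by unfold Pre_count_motility; infer_instance
def pvWitness_count_motility : (List (List (String × Option String))) :=
  [[("mobility", none)]]

def Spec_count_motility (track_points_list : List (List (String × Option String))) (out : List Int) : Prop := out = count_motility_alt track_points_list
instance (track_points_list : List (List (String × Option String))) (out : List Int) : Decidable (Spec_count_motility track_points_list out) := by unfold Spec_count_motility; infer_instance

-- ===== CLAIM (what is proved, stated in full; the proofs are below) =====
def Claim_equal_count_motility : Prop := ∀ (track_points_list : List (List (String × Option String))), Dom_count_motility track_points_list → Pre_count_motility track_points_list → Spec_count_motility track_points_list (count_motility track_points_list)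

-- ===== LEMMAS AND PROOFS =====
-- the linear per-point sum both algorithms compute
def sumPts (l : List (List (String × Option String))) : Int × Int := (l.map ptB).sum

lemma sumPts_append (l₁ l₂ : List (List (String × Option String))) :
    sumPts (l₁ ++ l₂) = ((sumPts l₁).1 + (sumPts l₂).1, (sumPts l₁).2 + (sumPts l₂).2) := by
  simp [sumPts, List.sum_append, Prod.add_def]

lemma goB_eq_sumPts (l : List (List (String × Option String))) : goB l = sumPts l := by
  fun_induction goB with
  | case1 => simp [sumPts]
  | case2 tp => simp [sumPts]
  | case3 a b t l mid p q ih1 ih2 =>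
    have hsplit := sumPts_append (l.take mid) (l.drop mid)
    rw [List.take_append_drop] at hsplit
    rw [hsplit, ← ih1, ← ih2]

lemma countA_eq (l : List (List (String × Option String))) (m nm : Int)
    (h : ∀ tp ∈ l, (mobLookup tp).isSome = true) :
    countA l m nm = [m + (sumPts l).1, nm + (sumPts l).2] := by
  induction l generalizing m nm with
  | nil => simp [countA, sumPts]
  | cons tp rest ih =>
    have htp : (mobLookup tp).isSome = true := h tp (List.mem_cons_self ..)
    have hrest : ∀ tp' ∈ rest, (mobLookup tp').isSome = true :=
      fun tp' h' => h tp' (List.mem_cons_of_mem _ h')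
    have hsum : sumPts (tp :: rest) =
        ((ptB tp).1 + (sumPts rest).1, (ptB tp).2 + (sumPts rest).2) := by
      simp [sumPts, List.sum_cons, Prod.ext_iff]
    simp only [countA]
    cases hmo : mobLookup tp with
    | none => simp [hmo] at htp
    | some o =>
      cases o with
      | none =>
        rw [hsum, ih m (nm + 1) hrest]
        simp only [ptB, hmo, List.cons.injEq, and_true]
        omega
      | some s =>
        by_cases hs : PySem.Str.lower s == "motile"
        · simp only [hs, if_true]
          rw [hsum, ih (m + 1) nm hrest]
          simp only [ptB, hmo, hs, if_true, List.cons.injEq, and_true]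
          omega
        · simp only [hs, Bool.false_eq_true, if_false]
          rw [hsum, ih m (nm + 1) hrest]
          simp only [ptB, hmo, hs, Bool.false_eq_true, if_false, List.cons.injEq, and_true]
          omega

-- ===== VERDICT (by name: the statement is the Claim_ definition above) =====
theorem count_motility_spec : Claim_equal_count_motility := by
  intro l _ hpre
  unfold Spec_count_motility count_motility count_motility_alt
  rw [countA_eq l 0 0 hpre, goB_eq_sumPts]
  simp
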